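-- pv_equiv track=rewrite | github.com/xbrlware/ernest | aggregate/aggregate-2-hop-otc.py | reduce_is_otc
-- ===== SOURCE A (Python) =====
-- from collections import defaultdict
--
-- def reduce_is_otc(otc_array):
--     d = defaultdict(list)
--     for key, value in otc_array:
--         try:
--             a = d[key]
--         except KeyError:
--             a = False
--
--         d[key] = a or value
--     return [(key, d[key]) for key in d]
-- ===== SOURCE B (Python) =====
-- from collections import defaultdict
-- from functools import reduce
--
-- def reduce_is_otc(otc_array):
--     groups = defaultdict(list)
--     for key, value in otc_array:
--         groups[key].append(value)
--     return [(key, reduce(lambda a, b: a or b, values))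
--             for key, values in groups.items()]
-- ===== Notes on version B (the rewrite author's own statement) =====
-- stated objective: alternative
-- what changed: A folds with `or` into a dict while scanning; B first groups all values per key into ordered lists and then reduces each group with functools.reduce(or) in a second pass over the grouping.
import Mathlib
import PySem

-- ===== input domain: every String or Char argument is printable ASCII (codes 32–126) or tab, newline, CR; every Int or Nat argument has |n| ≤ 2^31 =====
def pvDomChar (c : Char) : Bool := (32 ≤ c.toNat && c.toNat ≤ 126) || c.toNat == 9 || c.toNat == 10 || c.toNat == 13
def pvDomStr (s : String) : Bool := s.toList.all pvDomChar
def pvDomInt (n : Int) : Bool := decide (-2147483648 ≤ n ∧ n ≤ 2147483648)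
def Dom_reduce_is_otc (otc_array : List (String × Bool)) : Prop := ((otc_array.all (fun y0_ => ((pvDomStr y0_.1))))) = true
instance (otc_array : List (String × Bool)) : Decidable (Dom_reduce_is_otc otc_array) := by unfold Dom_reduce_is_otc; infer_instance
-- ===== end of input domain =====

-- B replaces A's fold-while-scanning with a group-then-reduce decomposition (alternative, same cost).

-- ===== PORT A =====
-- d = defaultdict(list): reading a missing key yields [] (never KeyError), and '[] or value'
-- is 'value'; thereafter the stored values are Bool, so the read is modelled with get?.
-- The comprehension '[(key, d[key]) for key in d]' walks keys in insertion order.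
def reduce_is_otc (otc_array : List (String × Bool)) : List (String × Bool) :=
  let d := otc_array.foldl
    (fun d p => d.insert p.1
      (match d.get? p.1 with
       | none => p.2               -- a = [] ; [] or value == value
       | some a => a || p.2))
    (PySem.Dict.empty : PySem.Dict String Bool)
  d.keys.map (fun k => (k, d.getD k false))

-- ===== PORT B =====
-- functools.reduce(lambda a, b: a or b, values); only called on nonempty group lists
-- (reduce on [] would raise in Python, so the [] branch is unreachable here).
def pyReduceOr : List Bool → Bool
  | [] => false
  | h :: t => t.foldl (fun a b => a || b) h

def reduce_is_otc_alt (otc_array : List (String × Bool)) : List (String × Bool) :=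
  let g := otc_array.foldl
    (fun g p => g.modify p.1 [] (fun vs => vs ++ [p.2]))
    (PySem.Dict.empty : PySem.Dict String (List Bool))
  g.items.map (fun p => (p.1, pyReduceOr p.2))

-- ===== PRECONDITION & SPEC =====
def Spec_reduce_is_otc (otc_array : List (String × Bool)) (out : List (String × Bool)) : Prop := out = reduce_is_otc_alt otc_array
instance (otc_array : List (String × Bool)) (out : List (String × Bool)) : Decidable (Spec_reduce_is_otc otc_array out) := by unfold Spec_reduce_is_otc; infer_instance

-- ===== CLAIM (what is proved, stated in full; the proofs are below) =====
def Claim_equal_reduce_is_otc : Prop := ∀ (otc_array : List (String × Bool)), Dom_reduce_is_otc otc_array → Spec_reduce_is_otc otc_array (reduce_is_otc otc_array)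

-- ===== LEMMAS AND PROOFS =====

-- Invariant relating A's boolean dict to B's grouping dict:
-- same keys in the same order, A's value = pyReduceOr of B's (nonempty) group.
def RelOG (d : PySem.Dict String Bool) (g : PySem.Dict String (List Bool)) : Prop :=
  d.items = g.items.map (fun p => (p.1, pyReduceOr p.2)) ∧ ∀ p ∈ g.items, p.2 ≠ []

theorem pyReduceOr_append (vs : List Bool) (v : Bool) (h : vs ≠ []) :
    pyReduceOr (vs ++ [v]) = (pyReduceOr vs || v) := by
  cases vs with
  | nil => exact absurd rfl h
  | cons a t => simp [pyReduceOr, List.foldl_append]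

theorem get?_rel (d : PySem.Dict String Bool) (g : PySem.Dict String (List Bool))
    (h : d.items = g.items.map (fun p => (p.1, pyReduceOr p.2))) (k : String) :
    d.get? k = (g.get? k).map pyReduceOr := by
  simp only [PySem.Dict.get?, h, List.find?_map, Option.map_map]
  rfl

theorem step_rel (d : PySem.Dict String Bool) (g : PySem.Dict String (List Bool))
    (p : String × Bool) (h : RelOG d g) :
    RelOG (d.insert p.1 (match d.get? p.1 with | none => p.2 | some a => a || p.2))
          (g.modify p.1 [] (fun vs => vs ++ [p.2])) := by
  obtain ⟨hit, hne⟩ := h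
  have hget := get?_rel d g hit p.1
  have hcont : d.contains p.1 = g.contains p.1 := by
    rw [PySem.Dict.contains_eq_isSome_get?, PySem.Dict.contains_eq_isSome_get?, hget]
    cases g.get? p.1 <;> rfl
  rw [PySem.Dict.modify]
  cases hg : g.get? p.1 with
  | none =>
    have hc : g.contains p.1 = false := by
      rw [PySem.Dict.contains_eq_isSome_get?, hg]; rfl
    have hd : d.contains p.1 = false := by rw [hcont, hc]
    rw [hget, hg]
    constructor
    · rw [PySem.Dict.items_insert_of_not_contains _ _ hd,
        PySem.Dict.items_insert_of_not_contains _ _ hc, hit]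
      simp [PySem.Dict.getD, hg, pyReduceOr]
    · intro q hq
      rw [PySem.Dict.items_insert_of_not_contains _ _ hc] at hq
      rcases List.mem_append.mp hq with hq | hq
      · exact hne q hq
      · simp at hq; simp [hq]
  | some vs =>
    have hvs : vs ≠ [] := by
      have : (p.1, vs) ∈ g.items := PySem.Dict.mem_items_of_get?_eq_some _ hg
      exact hne _ this
    have hc : g.contains p.1 = true := by
      rw [PySem.Dict.contains_eq_isSome_get?, hg]; rfl
    have hd : d.contains p.1 = true := by rw [hcont, hc]
    rw [hget, hg]
    constructor
    · rw [PySem.Dict.items_insert_of_contains _ _ hd,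
        PySem.Dict.items_insert_of_contains _ _ hc, hit]
      simp only [List.map_map, List.map_inj_left]
      intro q _
      by_cases hk : q.1 == p.1
      · simp [Function.comp, hk, PySem.Dict.getD, hg,
          pyReduceOr_append vs p.2 hvs]
      · simp [Function.comp, hk]
    · intro q hq
      rw [PySem.Dict.items_insert_of_contains _ _ hc] at hq
      rcases List.mem_map.mp hq with ⟨r, hr, hrq⟩
      by_cases hk : r.1 == p.1
      · simp only [hk, if_true] at hrq
        subst hrq; simp [PySem.Dict.getD, hg]
      · simp only [hk, Bool.false_eq_true, if_false] at hrq
        subst hrq; exact hne r hr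

theorem loop_rel (l : List (String × Bool)) (d : PySem.Dict String Bool)
    (g : PySem.Dict String (List Bool)) (h : RelOG d g) :
    RelOG
      (l.foldl (fun d p => d.insert p.1
        (match d.get? p.1 with | none => p.2 | some a => a || p.2)) d)
      (l.foldl (fun g p => g.modify p.1 [] (fun vs => vs ++ [p.2])) g) := by
  induction l generalizing d g with
  | nil => exact h
  | cons p t ih => exact ih _ _ (step_rel d g p h)

-- ===== VERDICT (by name: the statement is the Claim_ definition above) =====
theorem reduce_is_otc_spec : Claim_equal_reduce_is_otc := by
  intro otc_array _
  unfold Spec_reduce_is_otc reduce_is_otc reduce_is_otc_alt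
  have hrel := loop_rel otc_array PySem.Dict.empty PySem.Dict.empty
    ⟨rfl, by intro q hq; simp [PySem.Dict.empty] at hq⟩
  obtain ⟨hit, _⟩ := hrel
  have hnd : (otc_array.foldl (fun d p => d.insert p.1
      (match d.get? p.1 with | none => p.2 | some a => a || p.2))
      (PySem.Dict.empty : PySem.Dict String Bool)).keys.Nodup :=
    PySem.Dict.nodup_keys_foldl_insert_key otc_array Prod.fst _ _
      PySem.Dict.nodup_keys_empty
  rw [← PySem.Dict.items_eq_map_keys _ hnd false]
  exact hit
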